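-- pv_equiv track=rewrite | github.com/MrBrantCode/unitest_baseline | mut_generate/mist_train_taco/taco_3075/solution.py | count_subsegment_products
-- ===== SOURCE A (Python) =====
-- def count_subsegment_products(n, a):
--     # Convert the sequence to a list of signs (1 for positive, -1 for negative)
--     a = [1 if x > 0 else -1 for x in a]
--
--     # Initialize variables
--     last = 0
--     pr = 1
--
--     # Calculate the number of positive subsegments ending at each position
--     for q in a:
--         pr *= q
--         if pr > 0:
--             last += 1
--
--     # Initialize the answer with the count of positive subsegments ending at the last position
--     ans = last
--
--     # Update the count of positive subsegments for each starting position
--     for q in range(1, len(a)):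
--         if a[q - 1] > 0:
--             last -= 1
--         else:
--             last = n - q - last
--         ans += last
--
--     # Total subsegments are n * (n + 1) // 2
--     total_subsegments = n * (n + 1) // 2
--
--     # The number of negative subsegments is the total minus the number of positive subsegments
--     negative_subsegments = total_subsegments - ans
--
--     return (negative_subsegments, ans)
-- ===== SOURCE B (Python) =====
-- def count_subsegment_products(n, a):
--     # Single pass over prefix-product signs.  pos/neg count how many prefixes
--     # (the empty prefix included, with positive sign) have a positive/negative
--     # running product sign; a subsegment's product is positive exactly when
--     # its two bounding prefixes have the same sign.
--     pos, neg, s = 1, 0, 1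
--     for x in a:
--         if x <= 0:
--             s = -s
--         if s > 0:
--             pos += 1
--         else:
--             neg += 1
--     positive = pos * (pos - 1) // 2 + neg * (neg - 1) // 2
--     return (n * (n + 1) // 2 - positive, positive)
-- ===== Notes on version B (the rewrite author's own statement) =====
-- stated objective: simpler
-- what changed: Replaces A's two loops (a product scan plus a per-start-position complement recurrence over range(1,len(a))) by one pass counting positive/negative prefix-product signs and the closed form pos*(pos-1)//2 + neg*(neg-1)//2; since n is declared to be len(a), Pre_ excludes the malformed inputs where n differs from len(a) and the result actually depends on n (some proper nonempty prefix with an odd number of nonpositive elements), on which A complements against a wrong total and can return negative counts.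
-- outside the precondition, e.g. on count_subsegment_products(2, [1, -1, 3]): A returns (2, 1), B returns (1, 2); on count_subsegment_products(-3, [2, -4, 0, 3, -4]): A returns (4, -1), B returns (-4, 7)
import Mathlib
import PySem

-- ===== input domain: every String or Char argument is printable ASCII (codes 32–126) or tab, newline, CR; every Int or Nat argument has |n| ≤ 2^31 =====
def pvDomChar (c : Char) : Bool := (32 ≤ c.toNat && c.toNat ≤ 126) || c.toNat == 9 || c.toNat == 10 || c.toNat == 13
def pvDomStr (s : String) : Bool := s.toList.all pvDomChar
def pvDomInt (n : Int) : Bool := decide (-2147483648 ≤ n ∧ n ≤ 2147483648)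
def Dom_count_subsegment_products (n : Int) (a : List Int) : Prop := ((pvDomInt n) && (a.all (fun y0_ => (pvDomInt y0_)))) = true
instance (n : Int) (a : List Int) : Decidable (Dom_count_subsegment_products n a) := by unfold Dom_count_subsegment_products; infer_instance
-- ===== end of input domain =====

-- B replaces A's two index-driven loops by a single pass counting positive/negative
-- prefix-product signs and a closed-form pair count (objective: simpler).

-- ===== PORT A =====
def count_subsegment_products (n : Int) (a : List Int) : Int × Int :=
  -- a = [1 if x > 0 else -1 for x in a]
  let a' : List Int := a.map (fun x => if x > 0 then (1 : Int) else -1)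
  -- first loop: state (last, pr)
  let p1 : Int × Int := a'.foldl (fun st q =>
      let pr := st.2 * q
      (if pr > 0 then st.1 + 1 else st.1, pr)) (0, 1)
  -- second loop over range(1, len(a)): state (last, ans); a[q-1] always in range
  let st : Int × Int := (PySem.List.pyRange 1 (a'.length : Int) 1).foldl (fun st q =>
      let last := if PySem.List.pyGetD a' (q - 1) 0 > 0 then st.1 - 1 else n - q - st.1
      (last, st.2 + last)) (p1.1, p1.1)
  let total := PySem.Int.floordiv (n * (n + 1)) 2
  (total - st.2, st.2)

-- ===== PORT B =====
def count_subsegment_products_alt (n : Int) (a : List Int) : Int × Int :=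
  -- one pass: pos/neg = prefixes (empty included, positive) with positive/negative sign
  let st : Int × Int × Int := a.foldl (fun st x =>
      let s := if x ≤ 0 then -st.2.2 else st.2.2
      if s > 0 then (st.1 + 1, st.2.1, s) else (st.1, st.2.1 + 1, s)) (1, 0, 1)
  let pos := st.1
  let neg := st.2.1
  let positive := PySem.Int.floordiv (pos * (pos - 1)) 2 + PySem.Int.floordiv (neg * (neg - 1)) 2
  (PySem.Int.floordiv (n * (n + 1)) 2 - positive, positive)

-- ===== PRECONDITION & SPEC =====
-- n is declared to be the length of a; Pre_ excludes the malformed inputs where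
-- n differs from len(a) AND the result actually depends on n (some proper nonempty
-- prefix of a has an odd number of nonpositive elements): there A complements its
-- running count against a wrong total and can return negative "counts" such as (4, -1).
def Pre_count_subsegment_products (n : Int) (a : List Int) : Prop := n = (a.length : Int) ∨ ((List.range a.length).all (fun k => k == 0 || (a.take k).countP (fun x => x ≤ 0) % 2 == 0) = true)
instance (n : Int) (a : List Int) : Decidable (Pre_count_subsegment_products n a) := by unfold Pre_count_subsegment_products; infer_instance

def pvWitness_count_subsegment_products : Int × List Int := (3, [1, -2, 3])

def Spec_count_subsegment_products (n : Int) (a : List Int) (out : Int × Int) : Prop := out = count_subsegment_products_alt n a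
instance (n : Int) (a : List Int) (out : Int × Int) : Decidable (Spec_count_subsegment_products n a out) := by unfold Spec_count_subsegment_products; infer_instance

-- ===== CLAIM (what is proved, stated in full; the proofs are below) =====
def Claim_equal_count_subsegment_products : Prop := ∀ (n : Int) (a : List Int), Dom_count_subsegment_products n a → Pre_count_subsegment_products n a → Spec_count_subsegment_products n a (count_subsegment_products n a)

-- ===== LEMMAS AND PROOFS =====

-- 0/1 indicator of a negative sign
def pvNeg01 (s : Int) : Int := if s < 0 then 1 else 0

-- all elements are ±1 (the sign list)
def pvPM (t : List Int) : Prop := ∀ e ∈ t, e = 1 ∨ e = -1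

-- number of nonempty prefixes of t whose running product, started at sign s, is positive / negative
def pvPosC : Int → List Int → Int
  | _, [] => 0
  | s, x :: t => (if s * x > 0 then 1 else 0) + pvPosC (s * x) t

def pvNegC : Int → List Int → Int
  | _, [] => 0
  | s, x :: t => (if s * x < 0 then 1 else 0) + pvNegC (s * x) t

-- sum of pvPosC 1 over all nonempty suffixes
def pvTS : List Int → Int
  | [] => 0
  | x :: t => pvPosC 1 (x :: t) + pvTS t

-- structural form of A's second loop
def pvLoop2 (n : Int) : List Int → Int → Int × Int → Int × Int
  | [], _, st => st
  | x :: u, q, st =>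
      let last := if x > 0 then st.1 - 1 else n - q - st.1
      pvLoop2 n u (q + 1) (last, st.2 + last)

theorem pvPM_map_sg (a : List Int) : pvPM (a.map (fun x => if x > 0 then (1 : Int) else -1)) := by
  intro e he
  simp only [List.mem_map] at he
  obtain ⟨x, _, rfl⟩ := he
  split <;> simp

theorem pvFlip (t : List Int) : ∀ s : Int, s ≠ 0 → pvPM t →
    pvPosC (-s) t = pvNegC s t ∧ pvNegC (-s) t = pvPosC s t := by
  induction t with
  | nil => intro s _ _; simp [pvPosC, pvNegC]
  | cons x t ih =>
    intro s hs hpm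
    have hx := hpm x (by simp)
    have hsx : s * x ≠ 0 := by rcases hx with h | h <;> simp [h, hs]
    have := ih (s * x) hsx (fun e he => hpm e (by simp [he]))
    simp only [pvPosC, pvNegC, neg_mul]
    constructor
    · rw [this.1]
      congr 1
      omega
    · rw [this.2]
      congr 1
      omega

theorem pvPosC_add_NegC (t : List Int) : ∀ s : Int, s ≠ 0 → pvPM t →
    pvPosC s t + pvNegC s t = (t.length : Int) := by
  induction t with
  | nil => intro s _ _; simp [pvPosC, pvNegC]
  | cons x t ih =>
    intro s hs hpm
    have hx := hpm x (by simp)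
    have hsx : s * x ≠ 0 := by rcases hx with h | h <;> simp [h, hs]
    have := ih (s * x) hsx (fun e he => hpm e (by simp [he]))
    simp only [pvPosC, pvNegC, List.length_cons]
    have h1 : (if s * x > 0 then (1:Int) else 0) + (if s * x < 0 then (1:Int) else 0) = 1 := by
      rcases lt_trichotomy (s * x) 0 with h | h | h
      · simp [h, not_lt.mpr (le_of_lt h)]
      · exact absurd h hsx
      · simp [h, not_lt.mpr (le_of_lt h)]
    push_cast
    omega

-- A's first loop computes (last + pvPosC pr t, pr * t.prod)
theorem pvFoldA (t : List Int) : ∀ last pr : Int,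
    t.foldl (fun (st : Int × Int) q =>
      let pr := st.2 * q
      (if pr > 0 then st.1 + 1 else st.1, pr)) (last, pr)
      = (last + pvPosC pr t, pr * t.prod) := by
  induction t with
  | nil => intro last pr; simp [pvPosC]
  | cons x t ih =>
    intro last pr
    simp only [List.foldl_cons, List.prod_cons, pvPosC]
    rw [ih]
    simp only [Prod.mk.injEq]
    constructor
    · split <;> ring
    · ring

-- B's loop computes (pos + pvPosC s t, neg + pvNegC s t, s * t.prod)
theorem pvFoldB (t : List Int) : ∀ pos neg s : Int, s ≠ 0 → pvPM t →
    t.foldl (fun (st : Int × Int × Int) x =>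
      let s := x * st.2.2
      if s > 0 then (st.1 + 1, st.2.1, s) else (st.1, st.2.1 + 1, s)) (pos, neg, s)
      = (pos + pvPosC s t, neg + pvNegC s t, s * t.prod) := by
  induction t with
  | nil => intro pos neg s _ _; simp [pvPosC, pvNegC]
  | cons x t ih =>
    intro pos neg s hs hpm
    have hx := hpm x (by simp)
    have hsx : s * x ≠ 0 := by rcases hx with h | h <;> simp [h, hs]
    have hxs : x * s = s * x := by ring
    simp only [List.foldl_cons, List.prod_cons, pvPosC, pvNegC, hxs]
    by_cases h : s * x > 0
    · simp only [if_pos h]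
      rw [ih (pos+1) neg (s*x) hsx (fun e he => hpm e (by simp [he]))]
      have : ¬ s * x < 0 := by omega
      simp only [if_neg this, Prod.mk.injEq]
      refine ⟨by ring, by ring, by ring⟩
    · simp only [if_neg h]
      rw [ih pos (neg+1) (s*x) hsx (fun e he => hpm e (by simp [he]))]
      have hlt : s * x < 0 := by omega
      simp only [if_pos hlt, Prod.mk.injEq]
      refine ⟨by ring, by ring, by ring⟩

-- bridge: the pyRange fold of A's second loop is pvLoop2 on the dropped suffix (minus its last element)
theorem pvBridge (n : Int) (t : List Int) : ∀ (w : List Int) (k : Nat), t.drop k = w → ∀ st : Int × Int,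
    (PySem.List.pyRange ((k : Int) + 1) (t.length : Int) 1).foldl (fun st q =>
      let last := if PySem.List.pyGetD t (q - 1) 0 > 0 then st.1 - 1 else n - q - st.1
      (last, st.2 + last)) st
      = pvLoop2 n w.dropLast ((k : Int) + 1) st := by
  intro w
  induction w with
  | nil =>
    intro k hk st
    have hlen : t.length ≤ k := by
      by_contra h
      have := List.drop_eq_nil_iff.mp hk
      omega
    rw [PySem.List.pyRange_one_eq_nil (by exact_mod_cast by omega : (t.length : Int) ≤ (k : Int) + 1)]
    simp [pvLoop2]
  | cons x w ih =>
    intro k hk st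
    have hklt : k < t.length := by
      by_contra h
      rw [List.drop_eq_nil_iff.mpr (by omega)] at hk
      simp at hk
    have hdrop : t.drop (k + 1) = w := by
      have := congrArg (List.drop 1) hk
      simpa [List.drop_drop, Nat.add_comm] using this
    have hget : PySem.List.pyGetD t ((k : Int) + 1 - 1) 0 = x := by
      have h0 : ((k : Int) + 1 - 1) = (k : Int) := by ring
      rw [h0, PySem.List.pyGetD_natCast]
      have : t[k]? = some x := by
        have := congrArg (fun l => l[0]?) hk
        simpa [List.getElem?_drop] using this
      simp [List.getD, this]
    cases w with
    | nil =>
      have hlen : t.length = k + 1 := by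
        have := List.drop_eq_nil_iff.mp hdrop
        have h2 := congrArg List.length hk
        simp [List.length_drop] at h2
        omega
      rw [PySem.List.pyRange_one_eq_nil (by rw [hlen]; push_cast; omega)]
      simp [pvLoop2]
    | cons y w' =>
      have hlt : (k : Int) + 1 < (t.length : Int) := by
        have h2 := congrArg List.length hk
        simp [List.length_drop] at h2
        omega
      rw [PySem.List.pyRange_one_cons hlt]
      simp only [List.foldl_cons, hget]
      have h3 : ((k : Int) + 1 + 1) = ((k + 1 : Nat) : Int) + 1 := by push_cast; ring
      rw [h3, ih (k + 1) hdrop]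
      simp only [List.dropLast, pvLoop2]
      rw [h3]

-- the invariant of A's second loop, in closed form
theorem pvLoop2_spec (n z : Int) : ∀ (u : List Int) (s q ans : Int),
    s ≠ 0 → pvPM u → (z = 1 ∨ z = -1) →
    (pvLoop2 n u q (pvPosC 1 (u ++ [z]) + (n - q - (u.length : Int)) * pvNeg01 s, ans)).2
      = ans + pvTS (u ++ [z]) - pvPosC 1 (u ++ [z])
        + (n - q - (u.length : Int)) * (pvNegC s (u ++ [z]) - pvNeg01 (s * (u ++ [z]).prod)) := by
  intro u
  induction u with
  | nil =>
    intro s q ans hs _ hz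
    simp only [List.nil_append, pvLoop2, pvTS, pvPosC, pvNegC, List.prod_cons,
      List.prod_nil, List.length_nil, pvNeg01]
    ring_nf
  | cons x u ih =>
    intro s q ans hs hpm hz
    have hx := hpm x (by simp)
    have hpm' : pvPM u := fun e he => hpm e (by simp [he])
    have hpmw : pvPM (u ++ [z]) := by
      intro e he
      rcases List.mem_append.mp he with h | h
      · exact hpm' e h
      · simp at h; subst h; exact hz
    have hsx : s * x ≠ 0 := by rcases hx with h | h <;> simp [h, hs]
    simp only [List.cons_append, pvLoop2, List.length_cons]
    push_cast
    have hlast : (if x > 0 then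
          pvPosC 1 (x :: (u ++ [z])) + (n - q - ((u.length : Int) + 1)) * pvNeg01 s - 1
        else n - q - (pvPosC 1 (x :: (u ++ [z])) + (n - q - ((u.length : Int) + 1)) * pvNeg01 s))
        = pvPosC 1 (u ++ [z]) + (n - (q + 1) - (u.length : Int)) * pvNeg01 (s * x) := by
      rcases hx with h | h
      · subst h
        rw [if_pos (by norm_num : (1:Int) > 0)]
        have e1 : pvPosC 1 ((1:Int) :: (u ++ [z])) = 1 + pvPosC 1 (u ++ [z]) := by
          simp [pvPosC]
        rw [e1, mul_one]
        ring
      · subst h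
        rw [if_neg (by norm_num : ¬ ((-1:Int) > 0))]
        have e1 : pvPosC 1 ((-1:Int) :: (u ++ [z])) = pvNegC 1 (u ++ [z]) := by
          have := (pvFlip (u ++ [z]) 1 one_ne_zero hpmw).1
          simp [pvPosC, this]
        have hsum := pvPosC_add_NegC (u ++ [z]) 1 one_ne_zero hpmw
        have hlenw : ((u ++ [z]).length : Int) = (u.length : Int) + 1 := by
          simp
        rw [hlenw] at hsum
        have e2 : pvNeg01 (s * (-1)) = 1 - pvNeg01 s := by
          simp only [pvNeg01, mul_neg_one]
          rcases lt_trichotomy s 0 with h' | h' | h'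
          · rw [if_neg (by omega), if_pos h']; ring
          · exact absurd h' hs
          · rw [if_pos (by omega), if_neg (by omega)]; ring
        rw [e1, e2]
        linear_combination -hsum
    rw [hlast]
    rw [ih (s * x) (q + 1) _ hsx hpm' hz]
    simp only [pvTS, pvNegC, pvPosC, List.prod_cons, pvNeg01]
    have hassoc : s * (x * (u ++ [z]).prod) = s * x * (u ++ [z]).prod := by ring
    simp only [hassoc]
    ring

-- 2 * pvTS in closed form
theorem pvTS_closed (t : List Int) : pvPM t →
    2 * pvTS t = (1 + pvPosC 1 t) * (1 + pvPosC 1 t - 1) + pvNegC 1 t * (pvNegC 1 t - 1) := by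
  induction t with
  | nil => intro _; simp [pvTS, pvPosC, pvNegC]
  | cons x t ih =>
    intro hpm
    have hx := hpm x (by simp)
    have hpm' : pvPM t := fun e he => hpm e (by simp [he])
    have iht := ih hpm'
    rcases hx with h | h
    · subst h
      have e1 : pvPosC 1 ((1:Int) :: t) = 1 + pvPosC 1 t := by simp [pvPosC]
      have e2 : pvNegC 1 ((1:Int) :: t) = pvNegC 1 t := by simp [pvNegC]
      simp only [pvTS, e1, e2]
      linear_combination iht
    · subst h
      have e1 : pvPosC 1 ((-1:Int) :: t) = pvNegC 1 t := by
        have := (pvFlip t 1 one_ne_zero hpm').1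
        simp [pvPosC, this]
      have e2 : pvNegC 1 ((-1:Int) :: t) = 1 + pvPosC 1 t := by
        have := (pvFlip t 1 one_ne_zero hpm').2
        simp [pvNegC, this]
      simp only [pvTS, e1, e2]
      linear_combination iht

theorem pv_fd_two (x c : Int) (h : x = 2 * c) : PySem.Int.floordiv x 2 = c := by
  rw [PySem.Int.floordiv_eq_ediv_of_pos (by omega), h]
  exact Int.mul_ediv_cancel_left c (by omega)

-- B's fold over a is the sign fold over the mapped sign list
theorem pvMapFold (a : List Int) (init : Int × Int × Int) :
    a.foldl (fun (st : Int × Int × Int) x =>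
      let s := if x ≤ 0 then -st.2.2 else st.2.2
      if s > 0 then (st.1 + 1, st.2.1, s) else (st.1, st.2.1 + 1, s)) init
    = (a.map (fun x => if x > 0 then (1 : Int) else -1)).foldl (fun (st : Int × Int × Int) x =>
      let s := x * st.2.2
      if s > 0 then (st.1 + 1, st.2.1, s) else (st.1, st.2.1 + 1, s)) init := by
  rw [List.foldl_map]
  congr 1
  funext st x
  by_cases hx : x ≤ 0
  · simp [hx, not_lt.mpr hx]
  · simp [hx, (by omega : 0 < x), one_mul]


-- the sign map's product is +1 or -1 according to the parity of nonpositive elements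
theorem pvSgProd (a : List Int) :
    (a.map (fun x => if x > 0 then (1 : Int) else -1)).prod
      = if a.countP (fun x => decide (x ≤ 0)) % 2 = 0 then 1 else -1 := by
  induction a with
  | nil => simp
  | cons x a ih =>
    simp only [List.map_cons, List.prod_cons, List.countP_cons, ih]
    by_cases hx : x ≤ 0
    · have hngt : ¬ x > 0 := by omega
      simp only [hx, hngt, decide_true, if_true, if_false]
      rcases Nat.even_or_odd (a.countP (fun x => decide (x ≤ 0))) with h | h
      · have h0 : a.countP (fun x => decide (x ≤ 0)) % 2 = 0 := Nat.even_iff.mp h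
        have h1 : (a.countP (fun x => decide (x ≤ 0)) + 1) % 2 = 1 := by omega
        simp [h0, h1]
      · have h0 : a.countP (fun x => decide (x ≤ 0)) % 2 = 1 := Nat.odd_iff.mp h
        have h1 : (a.countP (fun x => decide (x ≤ 0)) + 1) % 2 = 0 := by omega
        simp [h0, h1]
    · have hgt : x > 0 := by omega
      simp [hx, hgt]

-- if every proper nonempty prefix of a sign list has product 1, the only negative
-- running prefix can be the whole list
theorem pvNegC_of_prefix_pos (t : List Int) : pvPM t →
    (∀ k : Nat, 0 < k → k < t.length → (t.take k).prod = 1) →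
    pvNegC 1 t = pvNeg01 t.prod := by
  induction t with
  | nil => intro _ _; simp [pvNegC, pvNeg01]
  | cons x u ih =>
    intro hpm hpre
    cases u with
    | nil =>
      have hx := hpm x (by simp)
      rcases hx with h | h <;> subst h <;> simp [pvNegC, pvNeg01]
    | cons y v =>
      have hx1 : x = 1 := by
        have := hpre 1 (by omega) (by simp)
        simpa using this
      subst hx1
      have hpm' : pvPM (y :: v) := fun e he => hpm e (by simp [he])
      have hpre' : ∀ k : Nat, 0 < k → k < (y :: v).length → ((y :: v).take k).prod = 1 := by
        intro k hk hklt
        have := hpre (k + 1) (by omega) (by simp at hklt ⊢; omega)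
        simpa using this
      have hih := ih hpm' hpre'
      simp only [pvNegC, one_mul, List.prod_cons]
      rw [if_neg (by norm_num : ¬ ((1 : Int) < 0))]
      simpa [pvNegC] using hih

-- ===== VERDICT (by name: the statement is the Claim_ definition above) =====
theorem count_subsegment_products_spec : Claim_equal_count_subsegment_products := by
  intro n a _ hPre
  unfold Pre_count_subsegment_products at hPre
  unfold Spec_count_subsegment_products
  unfold count_subsegment_products count_subsegment_products_alt
  have hpm := pvPM_map_sg a
  simp only []
  rw [pvMapFold]
  set t : List Int := a.map (fun x => if x > 0 then (1:Int) else -1) with ht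
  rw [pvFoldB t 1 0 1 one_ne_zero hpm]
  rw [pvFoldA t 0 1]
  simp only [zero_add]
  have hbridge := pvBridge n t t 0 (by simp) (pvPosC 1 t, pvPosC 1 t)
  norm_num at hbridge
  rw [hbridge]
  have hlen : (a.length : Int) = (t.length : Int) := by simp [ht]
  rcases List.eq_nil_or_concat t with ht0 | ⟨u0, z, huz'⟩
  · -- empty list
    rw [ht0]
    simp only [pvLoop2, pvPosC, pvNegC, List.dropLast_nil]
    rw [pv_fd_two (((1:Int) + 0) * (1 + 0 - 1)) 0 (by ring), pv_fd_two ((0:Int) * (0 - 1)) 0 (by ring)]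
    norm_num
  · have huz : t = u0 ++ [z] := by rw [huz', List.concat_eq_append]
    have hz : z = 1 ∨ z = -1 := by
      apply hpm
      rw [huz]; simp
    have hpmu : pvPM u0 := by
      intro e he; apply hpm; rw [huz]; simp [he]
    have hpmw : pvPM (u0 ++ [z]) := by rw [← huz]; exact hpm
    have hdrop : t.dropLast = u0 := by rw [huz]; simp
    have hlenw : (t.length : Int) = (u0.length : Int) + 1 := by rw [huz]; simp
    rw [hdrop]
    -- the invariant applied at the initial state (pvNeg01 1 = 0)
    have hloop : (pvLoop2 n u0 1 (pvPosC 1 (u0 ++ [z]), pvPosC 1 (u0 ++ [z]))).2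
        = pvPosC 1 (u0 ++ [z]) + pvTS (u0 ++ [z]) - pvPosC 1 (u0 ++ [z])
          + (n - 1 - (u0.length : Int)) * (pvNegC 1 (u0 ++ [z]) - pvNeg01 (1 * (u0 ++ [z]).prod)) := by
      have h := pvLoop2_spec n z u0 1 1 (pvPosC 1 (u0 ++ [z])) one_ne_zero hpmu hz
      have h01 : pvNeg01 1 = 0 := by simp [pvNeg01]
      rw [h01, mul_zero, add_zero] at h
      exact h
    have hzero : (n - 1 - (u0.length : Int)) * (pvNegC 1 (u0 ++ [z]) - pvNeg01 (1 * (u0 ++ [z]).prod)) = 0 := by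
      rcases hPre with hPre | hPre
      · have hn1 : n - 1 - (u0.length : Int) = 0 := by rw [hPre, hlen, hlenw]; ring
        rw [hn1, zero_mul]
      · -- the result does not depend on n: every proper prefix sign product is 1
        have hpp : ∀ k : Nat, 0 < k → k < t.length → (t.take k).prod = 1 := by
          intro k hk hklt
          have hklt' : k < a.length := by
            have : t.length = a.length := by rw [ht]; simp
            omega
          have heven : (a.take k).countP (fun x => decide (x ≤ 0)) % 2 = 0 := by
            have hmem := List.all_eq_true.mp hPre k (List.mem_range.mpr hklt')
            have hk0 : (k == 0) = false := by simp; omega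
            rw [hk0, Bool.false_or] at hmem
            simpa using hmem
          have htake : t.take k = (a.take k).map (fun x => if x > 0 then (1 : Int) else -1) := by
            rw [ht, List.map_take]
          rw [htake, pvSgProd, if_pos heven]
        have hK := pvNegC_of_prefix_pos t hpm hpp
        rw [← huz, one_mul, hK, sub_self, mul_zero]
    rw [huz, hloop, hzero, add_zero]
    -- closed forms of the two triangular numbers
    obtain ⟨cP, hcP⟩ := Int.even_mul_succ_self (pvPosC 1 (u0 ++ [z]))
    obtain ⟨cN, hcN⟩ := Int.even_mul_succ_self (pvNegC 1 (u0 ++ [z]) - 1)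
    have hfdP : PySem.Int.floordiv ((1 + pvPosC 1 (u0 ++ [z])) * (1 + pvPosC 1 (u0 ++ [z]) - 1)) 2 = cP := by
      apply pv_fd_two
      linear_combination hcP
    have hfdN : PySem.Int.floordiv (pvNegC 1 (u0 ++ [z]) * (pvNegC 1 (u0 ++ [z]) - 1)) 2 = cN := by
      apply pv_fd_two
      linear_combination hcN
    have hTS : pvTS (u0 ++ [z]) = cP + cN := by
      have h1 := pvTS_closed (u0 ++ [z]) hpmw
      have : 2 * pvTS (u0 ++ [z]) = 2 * cP + 2 * cN := by linear_combination h1 + hcP + hcN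
      omega
    rw [hfdP, hfdN, hTS]
    rw [Prod.mk.injEq]
    constructor <;> ring
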